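-- pv_equiv track=rewrite | github.com/alexandergz1983/inversions_GC_skew_Hp | 2_gbff2mochi_basename.py | join_cleaner
-- ===== SOURCE A (Python) =====
-- def join_cleaner(joined_coordinates):
-- 	"""Certain features are annotated as 'join(123..543, 678..987)' and these need to be cleaned up. Returns
-- 	start and stop coordinates, but for the whole thing. i.e. it joins all the individual pieces together,
-- 	which throws away annotations indicating individual pieces. This process could be improved in future versions."""
--
-- 	strp_a = joined_coordinates.strip("join(").strip(")")
-- 	splt_a = strp_a.split(",")
-- 	final_coords = []
-- 	for i in splt_a:
-- 		coordinates_ab = i.split("..")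
-- 		for j in coordinates_ab:
-- 			final_coords.append(j)
-- 	start_position = final_coords[0]
-- 	stop_position = final_coords[-1]
--
-- 	# Could add in some sort of annotation for individual joined regions within the name in the future
-- 	gene_nm = ""
--
-- 	return start_position, stop_position, gene_nm
-- ===== SOURCE B (Python) =====
-- def join_cleaner(joined_coordinates):
-- 	strp_a = joined_coordinates.strip("join(").strip(")")
-- 	parts = strp_a.split(",")
-- 	start_position = parts[0].split("..")[0]
-- 	stop_position = parts[-1].split("..")[-1]
-- 	return start_position, stop_position, ""
-- ===== Notes on version B (the rewrite author's own statement) =====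
-- stated objective: simpler
-- what changed: Drops the nested loops and the flattened token list: B goes straight to the first token of the first comma piece and the last token of the last comma piece.
import Mathlib
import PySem

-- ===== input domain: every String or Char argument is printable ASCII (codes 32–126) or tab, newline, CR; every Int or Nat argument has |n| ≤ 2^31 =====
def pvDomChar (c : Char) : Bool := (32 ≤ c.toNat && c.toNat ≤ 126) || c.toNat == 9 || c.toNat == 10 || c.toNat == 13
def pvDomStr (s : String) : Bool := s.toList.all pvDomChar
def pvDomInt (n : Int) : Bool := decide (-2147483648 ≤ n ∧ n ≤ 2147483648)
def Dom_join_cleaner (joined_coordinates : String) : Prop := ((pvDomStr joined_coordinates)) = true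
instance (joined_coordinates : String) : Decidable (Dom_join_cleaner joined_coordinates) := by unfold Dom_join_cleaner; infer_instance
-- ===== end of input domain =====

-- B drops A's nested flattening loops and reads the first/last tokens directly (objective: simpler).

-- ===== PORT A =====
-- s.split(sep) for the non-empty literal separators "," and ".." is PySem.Chars.splitOn on the
-- code points, mapped back to String; the [0] / [-1] lookups never fail (split is non-empty),
-- so the transliteration reads them with pyGet? and an unreachable "" default.
def join_cleaner (joined_coordinates : String) : String × String × String :=
  let strp_a := PySem.Str.stripChars (PySem.Str.stripChars joined_coordinates "join(") ")"
  let splt_a := (PySem.Chars.splitOn strp_a.toList [',']).map String.ofList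
  let final_coords := splt_a.foldl
    (fun acc i => ((PySem.Chars.splitOn i.toList ['.', '.']).map String.ofList).foldl
      (fun acc2 j => acc2 ++ [j]) acc) ([] : List String)
  let start_position := (PySem.List.pyGet? final_coords 0).getD ""
  let stop_position := (PySem.List.pyGet? final_coords (-1)).getD ""
  let gene_nm := ""
  (start_position, stop_position, gene_nm)

-- ===== PORT B =====
def join_cleaner_alt (joined_coordinates : String) : String × String × String :=
  let strp_a := PySem.Str.stripChars (PySem.Str.stripChars joined_coordinates "join(") ")"
  let parts := (PySem.Chars.splitOn strp_a.toList [',']).map String.ofList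
  let start_position := (PySem.List.pyGet?
    ((PySem.Chars.splitOn ((PySem.List.pyGet? parts 0).getD "").toList ['.', '.']).map String.ofList) 0).getD ""
  let stop_position := (PySem.List.pyGet?
    ((PySem.Chars.splitOn ((PySem.List.pyGet? parts (-1)).getD "").toList ['.', '.']).map String.ofList) (-1)).getD ""
  (start_position, stop_position, "")

-- ===== PRECONDITION & SPEC =====
def Spec_join_cleaner (joined_coordinates : String) (out : String × String × String) : Prop := out = join_cleaner_alt joined_coordinates
instance (joined_coordinates : String) (out : String × String × String) : Decidable (Spec_join_cleaner joined_coordinates out) := by unfold Spec_join_cleaner; infer_instance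

-- ===== CLAIM (what is proved, stated in full; the proofs are below) =====
def Claim_equal_join_cleaner : Prop := ∀ (joined_coordinates : String), Dom_join_cleaner joined_coordinates → Spec_join_cleaner joined_coordinates (join_cleaner joined_coordinates)

-- ===== LEMMAS AND PROOFS =====

-- str.split on any separator returns at least one piece.
theorem splitOn_go_ne_nil (sep : List Char) :
    ∀ (fuel : Nat) (l cur : List Char) (acc : List (List Char)),
      PySem.Chars.splitOn.go sep fuel l cur acc ≠ [] := by
  intro fuel
  induction fuel with
  | zero => intro l cur acc; simp [PySem.Chars.splitOn.go]
  | succ n ih =>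
    intro l cur acc
    cases l with
    | nil => simp [PySem.Chars.splitOn.go]
    | cons c rest =>
      simp only [PySem.Chars.splitOn.go]
      split_ifs with h
      · exact ih _ _ _
      · exact ih _ _ _

theorem splitOn_ne_nil (s sep : List Char) : PySem.Chars.splitOn s sep ≠ [] := by
  unfold PySem.Chars.splitOn; exact splitOn_go_ne_nil sep _ s [] []

theorem pyGet?_zero {α : Type} (l : List α) (h : l ≠ []) :
    PySem.List.pyGet? l 0 = l.head? := by
  have hl : 0 < l.length := List.length_pos_iff.mpr h
  simp only [PySem.List.pyGet?, PySem.List.pyIdx?]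
  rw [if_pos le_rfl, if_pos (by exact_mod_cast hl)]
  simp [List.head?_eq_getElem?]

theorem pyGet?_neg_one {α : Type} (l : List α) (h : l ≠ []) :
    PySem.List.pyGet? l (-1) = l.getLast? := by
  have hl : 0 < l.length := List.length_pos_iff.mpr h
  simp only [PySem.List.pyGet?, PySem.List.pyIdx?]
  rw [if_neg (by omega), if_pos (by omega : -((l.length : Nat) : Int) ≤ -1)]
  have h1 : ((-(-1 : Int)).toNat) = 1 := by norm_num
  simp only [h1, List.getLast?_eq_getElem?]
  rfl

theorem flatMap_ne_nil {α β : Type} (f : α → List β) (h : ∀ x, f x ≠ [])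
    (l : List α) (hl : l ≠ []) : l.flatMap f ≠ [] := by
  cases l with
  | nil => exact absurd rfl hl
  | cons x xs =>
    simp only [List.flatMap_cons, ne_eq, List.append_eq_nil_iff, not_and]
    intro hfx; exact absurd hfx (h x)

theorem head?_flatMap_cons {α β : Type} (f : α → List β) (h : ∀ x, f x ≠ [])
    (p : α) (ps : List α) : ((p :: ps).flatMap f).head? = (f p).head? := by
  rw [List.flatMap_cons, List.head?_append_of_ne_nil _ (h p)]

theorem getLast?_flatMap {α β : Type} (f : α → List β) (h : ∀ x, f x ≠ []) :
    ∀ (l : List α) (hl : l ≠ []), (l.flatMap f).getLast? = (f (l.getLast hl)).getLast? := by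
  intro l
  induction l with
  | nil => intro hl; exact absurd rfl hl
  | cons p ps ih =>
    intro _
    cases ps with
    | nil => simp [List.flatMap]
    | cons q qs =>
      have htail : (q :: qs).flatMap f ≠ [] := flatMap_ne_nil f h _ (by simp)
      rw [List.flatMap_cons, List.getLast?_append_of_ne_nil _ htail, ih (by simp),
          List.getLast_cons (by simp : q :: qs ≠ [])]

-- the inner append loop appends the split, so the whole nested loop is a flatMap
theorem final_coords_eq (parts : List String) :
    parts.foldl
      (fun acc i => ((PySem.Chars.splitOn i.toList ['.', '.']).map String.ofList).foldl
        (fun acc2 j => acc2 ++ [j]) acc) ([] : List String)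
    = parts.flatMap (fun i => (PySem.Chars.splitOn i.toList ['.', '.']).map String.ofList) := by
  induction parts using List.reverseRecOn with
  | nil => simp
  | append_singleton xs x ih =>
    rw [List.foldl_append, List.foldl_cons, List.foldl_nil,
        PySem.List.foldl_append_singleton, ih, List.flatMap_append]
    simp

-- first/last element of the flattened list = first/last of the split of the first/last piece
theorem pyFirst_flatMap {α β : Type} (f : α → List β) (h : ∀ x, f x ≠ [])
    (l : List α) (hl : l ≠ []) (d : α) :
    PySem.List.pyGet? (l.flatMap f) 0
      = PySem.List.pyGet? (f ((PySem.List.pyGet? l 0).getD d)) 0 := by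
  obtain ⟨p, ps, rfl⟩ := List.exists_cons_of_ne_nil hl
  rw [pyGet?_zero _ (flatMap_ne_nil f h _ hl), head?_flatMap_cons f h,
      pyGet?_zero _ hl, pyGet?_zero _ (h _)]
  simp

theorem pyLast_flatMap {α β : Type} (f : α → List β) (h : ∀ x, f x ≠ [])
    (l : List α) (hl : l ≠ []) (d : α) :
    PySem.List.pyGet? (l.flatMap f) (-1)
      = PySem.List.pyGet? (f ((PySem.List.pyGet? l (-1)).getD d)) (-1) := by
  rw [pyGet?_neg_one _ (flatMap_ne_nil f h l hl), getLast?_flatMap f h l hl,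
      pyGet?_neg_one _ hl, List.getLast?_eq_some_getLast hl, pyGet?_neg_one _ (h _)]
  simp

-- ===== VERDICT (by name: the statement is the Claim_ definition above) =====
theorem join_cleaner_spec : Claim_equal_join_cleaner := by
  intro jc _
  unfold Spec_join_cleaner join_cleaner join_cleaner_alt
  simp only [final_coords_eq]
  have hfne : ∀ x : String,
      (fun i => (PySem.Chars.splitOn i.toList ['.', '.']).map String.ofList) x ≠ [] := by
    intro x
    simp only [ne_eq, List.map_eq_nil_iff]
    exact splitOn_ne_nil _ _
  have hpne : (PySem.Chars.splitOn
      (PySem.Str.stripChars (PySem.Str.stripChars jc "join(") ")").toList [',']).map String.ofList ≠ [] := by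
    simp only [ne_eq, List.map_eq_nil_iff]
    exact splitOn_ne_nil _ _
  exact congrArg₂ Prod.mk
    (congrArg (fun o => o.getD "") (pyFirst_flatMap _ hfne _ hpne ""))
    (congrArg₂ Prod.mk
      (congrArg (fun o => o.getD "") (pyLast_flatMap _ hfne _ hpne "")) rfl)
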